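-- pv_equiv track=rewrite | github.com/aidino/funix | MLP301x_asm1_thainhFX16677@funix.edu.vn/ngo_thai_grade_the_exams.py | grade_the_exams
-- ===== SOURCE A (Python) =====
-- def grade_the_exams(student_info):
--     """ Tính điểm của mỗi sinh viên có thông tin hợp lệ
--
--     Args:
--         student_info (str): Thông tin của mỗi sinh viên có câu trả lời hợp lệ
--
--     Returns:
--         str: Mã số sinh viên
--         int: Điểm của sinh viên
--     """
--
--     correct_answer_key = "B,A,D,D,C,B,D,A,C,C,D,B,A,B,A,C,B,D,A,C,A,A,B,D,D"
--     correct_answer_array = correct_answer_key.split(',')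
--     data = student_info.split(',')
--     student_answer = data[1:]
--     point = 0
--     for index, answer in enumerate(student_answer):
--         if len(answer.strip()) == 0:
--             continue
--         if answer.strip() == correct_answer_array[index]:
--             point += 4
--         else:
--             point -= 1
--     return data[0], point
-- ===== SOURCE B (Python) =====
-- ANSWER_KEY = "B,A,D,D,C,B,D,A,C,C,D,B,A,B,A,C,B,D,A,C,A,A,B,D,D".split(',')
--
--
-- def _score(answers, key):
--     """Recursively score answers against the key, stopping when either runs out."""
--     if not answers or not key:
--         return 0
--     rest = _score(answers[1:], key[1:])
--     a = answers[0].strip()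
--     if not a:
--         return rest
--     return rest + 4 if a == key[0] else rest - 1
--
--
-- def grade_the_exams(student_info):
--     """Grade one student's answers: (student id, score)."""
--     data = student_info.split(',')
--     return data[0], _score(data[1:], ANSWER_KEY)
-- ===== Notes on version B (the rewrite author's own statement) =====
-- stated objective: alternative
-- what changed: Replaces A's indexed enumerate loop with +4/-1 accumulator and key lookups by a structural recursion over the pair (answers, key) that consumes both lists head-by-head, stops when either list is exhausted (so it never indexes the key), and builds the score back-to-front from the recursive tail.
import Mathlib
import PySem

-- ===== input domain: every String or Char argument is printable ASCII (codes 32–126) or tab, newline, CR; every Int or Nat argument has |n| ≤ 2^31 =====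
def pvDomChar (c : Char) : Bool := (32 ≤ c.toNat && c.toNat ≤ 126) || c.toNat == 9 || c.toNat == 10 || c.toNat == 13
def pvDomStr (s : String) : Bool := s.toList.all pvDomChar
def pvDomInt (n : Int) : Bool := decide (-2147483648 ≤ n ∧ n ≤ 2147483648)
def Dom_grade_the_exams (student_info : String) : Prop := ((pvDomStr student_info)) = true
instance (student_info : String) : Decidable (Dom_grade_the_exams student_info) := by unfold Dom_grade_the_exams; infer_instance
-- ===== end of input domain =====

-- B replaces A's indexed enumerate loop (+4/-1 accumulator with key lookups) by a structural
-- recursion over (answers, key) that stops when either list ends (alternative decomposition, same cost).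

-- ===== PORT A =====
def grade_the_exams (student_info : String) : String × Int :=
  let correct_answer_array :=
    ((PySem.Str.split? "B,A,D,D,C,B,D,A,C,C,D,B,A,B,A,C,B,D,A,C,A,A,B,D,D" ",").getD [])
  let data := ((PySem.Str.split? student_info ",").getD [])
  let student_answer := data.drop 1
  let point :=
    (PySem.List.enumerate student_answer 0).foldl
      (fun point p =>
        if PySem.Str.len (PySem.Str.strip p.2) == 0 then point
        else if PySem.Str.strip p.2 == PySem.List.pyGetD correct_answer_array p.1 "" then
          point + 4
        else point - 1) 0
  (PySem.List.pyGetD data 0 "", point)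

-- ===== PORT B =====
def pvAnswerKey : List String :=
  ((PySem.Str.split? "B,A,D,D,C,B,D,A,C,C,D,B,A,B,A,C,B,D,A,C,A,A,B,D,D" ",").getD [])

-- B's helper _score: structural recursion consuming both lists, stopping at either end.
def pvScore : List String → List String → Int
  | [], _ => 0
  | _ :: _, [] => 0
  | a :: answers, k :: key =>
    let rest := pvScore answers key
    let sa := PySem.Str.strip a
    if sa = "" then rest
    else if sa = k then rest + 4 else rest - 1

def grade_the_exams_alt (student_info : String) : String × Int :=
  let data := ((PySem.Str.split? student_info ",").getD [])
  (PySem.List.pyGetD data 0 "", pvScore (data.drop 1) pvAnswerKey)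

-- ===== PRECONDITION & SPEC =====
-- Pre_ excludes exactly the inputs with a non-blank answer past the 25-entry key
-- (data index ≥ 26), on which A's key lookup raises IndexError.
def Pre_grade_the_exams (student_info : String) : Prop :=
  (((((PySem.Str.split? student_info ",").getD [])).drop 26).all
    (fun a => PySem.Str.strip a == "")) = true
instance (student_info : String) : Decidable (Pre_grade_the_exams student_info) := by
  unfold Pre_grade_the_exams; infer_instance
def pvWitness_grade_the_exams : String := "sv1,B,A, ,D"

def Spec_grade_the_exams (student_info : String) (out : String × Int) : Prop :=
  out = grade_the_exams_alt student_info
instance (student_info : String) (out : String × Int) : Decidable (Spec_grade_the_exams student_info out) := by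
  unfold Spec_grade_the_exams; infer_instance

-- ===== CLAIM (what is proved, stated in full; the proofs are below) =====
def Claim_equal_grade_the_exams : Prop :=
  ∀ (student_info : String), Dom_grade_the_exams student_info →
    Pre_grade_the_exams student_info →
      Spec_grade_the_exams student_info (grade_the_exams student_info)

-- ===== LEMMAS AND PROOFS =====

-- A's enumerate loop, started at key index s, equals B's recursive score against key.drop s,
-- provided every answer whose key index would overflow strips to blank.
lemma pv_loop_eq (key : List String) :
    ∀ (ans : List String) (s : Nat) (pt : Int),
      (∀ a ∈ ans.drop (key.length - s), PySem.Str.strip a = "") →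
      (PySem.List.enumerate ans (s : Int)).foldl
        (fun point p =>
          if PySem.Str.len (PySem.Str.strip p.2) == 0 then point
          else if PySem.Str.strip p.2 == PySem.List.pyGetD key p.1 "" then point + 4
          else point - 1) pt
      = pt + pvScore ans (key.drop s) := by
  intro ans
  induction ans with
  | nil => intro s pt _; simp [PySem.List.enumerate, pvScore]
  | cons a rest ih =>
    intro s pt hblank
    rw [PySem.List.enumerate_cons]
    by_cases hs : s < key.length
    · have hdrop : key.drop s = key[s] :: key.drop (s + 1) :=
        List.drop_eq_getElem_cons hs
      have hget : PySem.List.pyGetD key (s : Int) "" = key[s] := by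
        rw [PySem.List.pyGetD_natCast]
        simp [List.getD, hs]
      have hrest : ∀ a' ∈ rest.drop (key.length - (s + 1)), PySem.Str.strip a' = "" := by
        intro a' ha'
        apply hblank
        have h1 : key.length - s = (key.length - (s + 1)) + 1 := by omega
        rw [h1, List.drop_succ_cons] at *
        exact ha'
      rw [hdrop]
      by_cases hb : PySem.Str.strip a = ""
      · have hskip : (PySem.Str.len (PySem.Str.strip a) == 0) = true := by
          simp [hb, PySem.Str.len]
        simp only [List.foldl_cons]
        rw [if_pos hskip]
        have hIH := ih (s + 1) pt hrest
        push_cast at hIH ⊢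
        rw [hIH]
        simp [pvScore, hb]
      · have hlen : (PySem.Str.len (PySem.Str.strip a) == 0) = false := by
          simp [PySem.Str.len] at *
          intro h
          apply hb
          have h2 : (PySem.Str.strip a).toList = [] := by
            rw [PySem.Str.toList_strip]; exact h
          cases hsa : PySem.Str.strip a with
          | _ l => rw [hsa] at h2; simp at h2; rw [h2] at hsa ⊢
        simp only [List.foldl_cons, hlen, Bool.false_eq_true, if_false, hget]
        by_cases hc : PySem.Str.strip a = key[s]
        · rw [if_pos (by simp [hc] : (PySem.Str.strip a == key[s]) = true)]
          have hIH := ih (s + 1) (pt + 4) hrest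
          push_cast at hIH ⊢
          rw [hIH]
          have hkb : key[s] ≠ "" := by rw [← hc]; exact hb
          simp [pvScore, hkb, hc]
          ring
        · have hcb : (PySem.Str.strip a == key[s]) = false := by simp [hc]
          rw [if_neg (by simp [hcb])]
          have hIH := ih (s + 1) (pt - 1) hrest
          push_cast at hIH ⊢
          rw [hIH]
          simp [pvScore, hb, hc]
          ring
    · -- key exhausted: every remaining answer is blank, both sides contribute nothing
      have hall : ∀ a' ∈ a :: rest, PySem.Str.strip a' = "" := by
        have : key.length - s = 0 := by omega
        rw [this, List.drop_zero] at hblank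
        exact hblank
      have hkd : key.drop s = [] := List.drop_eq_nil_of_le (by omega)
      rw [hkd]
      rw [← PySem.List.enumerate_cons]
      have : ∀ (l : List String) (s' : Int) (pt' : Int),
          (∀ a' ∈ l, PySem.Str.strip a' = "") →
          (PySem.List.enumerate l s').foldl
            (fun point p =>
              if PySem.Str.len (PySem.Str.strip p.2) == 0 then point
              else if PySem.Str.strip p.2 == PySem.List.pyGetD key p.1 "" then point + 4
              else point - 1) pt' = pt' := by
        intro l
        induction l with
        | nil => intro s' pt' _; simp [PySem.List.enumerate]
        | cons x xs ihx =>
          intro s' pt' hl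
          rw [PySem.List.enumerate_cons]
          have hx : PySem.Str.strip x = "" := hl x (by simp)
          have : PySem.Str.len (PySem.Str.strip x) == 0 := by simp [hx, PySem.Str.len]
          simp only [List.foldl_cons, this]
          exact ihx (s' + 1) pt' (fun a' ha' => hl a' (by simp [ha']))
      rw [this (a :: rest) s pt hall]
      simp [pvScore]

-- ===== VERDICT (by name: the statement is the Claim_ definition above) =====
theorem grade_the_exams_spec : Claim_equal_grade_the_exams := by
  intro s _hdom hpre
  unfold Spec_grade_the_exams grade_the_exams grade_the_exams_alt pvAnswerKey
  simp only []
  congr 1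
  have hpre' : ∀ a ∈ (((PySem.Str.split? s ",").getD [])).drop 1 |>.drop
      ((((PySem.Str.split? "B,A,D,D,C,B,D,A,C,C,D,B,A,B,A,C,B,D,A,C,A,A,B,D,D" ",").getD [])).length - 0),
      PySem.Str.strip a = "" := by
    have hkeylen :
        (((PySem.Str.split? "B,A,D,D,C,B,D,A,C,C,D,B,A,B,A,C,B,D,A,C,A,A,B,D,D" ",").getD [])).length
          = 25 := by decide
    rw [hkeylen]
    intro a ha
    unfold Pre_grade_the_exams at hpre
    rw [List.all_eq_true] at hpre
    have : a ∈ (((PySem.Str.split? s ",").getD [])).drop 26 := by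
      rw [List.drop_drop] at ha
      exact ha
    simpa using hpre a this
  have := pv_loop_eq
      (((PySem.Str.split? "B,A,D,D,C,B,D,A,C,C,D,B,A,B,A,C,B,D,A,C,A,A,B,D,D" ",").getD []))
      ((((PySem.Str.split? s ",").getD [])).drop 1) 0 0 hpre'
  rw [show ((0 : Nat) : Int) = 0 by rfl] at this
  rw [this]
  simp
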